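-- pv_equiv track=rewrite | github.com/roelschlaeger/usexmltodict | build_path.py | build_paths
-- ===== SOURCE A (Python) =====
-- def build_paths(data):
--     """Build list of (start, end, waypoints) tuples for a route."""
--     # lats, lons, texts, syms, names = list(zip(*data)][4]
--     names = list(zip(*data))[4]
--
--     waypoints = []
--
--     # tuples of (start, end, waypoints[])
--     results = []
--
--     for index, name in enumerate(names):
--         if (index == 0):
--             waypoints = []
--             start = index
--         elif name.startswith("GC"):
--             end = index
--             results.append((start, end, waypoints))
--             start = index
--             waypoints = []
--         elif not name.startswith("GC"):
--             waypoints.append(index)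
--
--     # go from last location back to first
--     end = 0
--     results.append((start, end, waypoints))
--
--     return results
-- ===== SOURCE B (Python) =====
-- def build_paths(data):
--     """Build list of (start, end, waypoints) tuples for a route."""
--     names = list(zip(*data))[4]
--     n = len(names)
--     anchors = [0] + [i for i in range(1, n) if names[i].startswith("GC")]
--     results = [(a, b, list(range(a + 1, b))) for a, b in zip(anchors, anchors[1:])]
--     results.append((anchors[-1], 0, list(range(anchors[-1] + 1, n))))
--     return results
-- ===== Notes on version B (the rewrite author's own statement) =====
-- stated objective: alternative
-- what changed: B first computes the list of segment-start anchors (index 0 plus every later 'GC' name), then derives each segment's waypoints as the integer range between consecutive anchors, instead of A's single-pass state machine accumulating waypoints.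
-- outside the precondition, e.g. on build_paths([]): A raises IndexError, B raises IndexError
import Mathlib
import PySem

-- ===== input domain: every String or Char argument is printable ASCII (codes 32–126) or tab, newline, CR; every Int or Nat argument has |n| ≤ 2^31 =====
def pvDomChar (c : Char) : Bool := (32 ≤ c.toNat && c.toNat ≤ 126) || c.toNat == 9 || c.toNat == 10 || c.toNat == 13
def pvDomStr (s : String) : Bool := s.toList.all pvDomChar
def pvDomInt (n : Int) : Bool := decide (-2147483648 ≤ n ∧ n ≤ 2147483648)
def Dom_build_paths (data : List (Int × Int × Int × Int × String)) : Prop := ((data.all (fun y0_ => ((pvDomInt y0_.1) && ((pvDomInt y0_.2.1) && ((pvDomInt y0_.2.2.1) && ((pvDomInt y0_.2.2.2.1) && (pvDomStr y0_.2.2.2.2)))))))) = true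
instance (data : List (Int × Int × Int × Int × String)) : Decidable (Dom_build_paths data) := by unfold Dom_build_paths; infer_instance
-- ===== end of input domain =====

-- B recomputes A's result by a different decomposition (anchors first, waypoints as ranges);
-- equivalence is about the return value, neither version mutates its argument.

-- ===== PORT A =====
-- The body of A's for-loop, on state (start, waypoints, results) and pair (index, name).
def stepA (st : Int × List Int × List (Int × Int × List Int)) (p : Int × String) :
    Int × List Int × List (Int × Int × List Int) :=
  match st, p with
  | (start, waypoints, results), (index, name) =>
    if index = 0 then (index, [], results)
    else if PySem.Str.startswith name "GC" then (index, [], results ++ [(start, index, waypoints)])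
    else (start, waypoints ++ [index], results)

-- names = list(zip(*data))[4]: for a nonempty list of 5-tuples this is exactly the 5th column
-- (empty data would raise IndexError — excluded by Pre_).
def build_paths (data : List (Int × Int × Int × Int × String)) : List (Int × Int × List Int) :=
  let names := data.map (fun t => t.2.2.2.2)
  -- start's initial value 0 is never read: index 0 assigns it on the first iteration
  -- (names ≠ [] by Pre_).
  let st := (PySem.List.enumerate names).foldl stepA (0, [], [])
  st.2.2 ++ [(st.1, 0, st.2.1)]

-- ===== PORT B =====
def build_paths_alt (data : List (Int × Int × Int × Int × String)) : List (Int × Int × List Int) :=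
  let names := data.map (fun t => t.2.2.2.2)
  let n : Int := names.length
  -- [0] + [i for i in range(1, n) if names[i].startswith("GC")]; names[i] is exact via getD
  -- since every i drawn from range(1, n) is in range.
  let anchors : List Int :=
    0 :: (PySem.List.pyRange 1 n 1).filter
      (fun i => PySem.Str.startswith (names.getD i.toNat "") "GC")
  let results := (anchors.zip anchors.tail).map
    (fun ab => (ab.1, ab.2, PySem.List.pyRange (ab.1 + 1) ab.2 1))
  results ++ [(anchors.getLastD 0, 0, PySem.List.pyRange (anchors.getLastD 0 + 1) n 1)]

-- ===== PRECONDITION & SPEC =====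
-- Pre_ excludes only the empty list, on which A raises IndexError (list(zip(*data)) is [] and [4] fails).
def Pre_build_paths (data : List (Int × Int × Int × Int × String)) : Prop := data ≠ []
instance (data : List (Int × Int × Int × Int × String)) : Decidable (Pre_build_paths data) := by unfold Pre_build_paths; infer_instance

def pvWitness_build_paths : (List (Int × Int × Int × Int × String)) := [(0, 0, 0, 0, "GC1"), (1, 1, 1, 1, "wp"), (2, 2, 2, 2, "GC2")]

def Spec_build_paths (data : List (Int × Int × Int × Int × String)) (out : List (Int × Int × List Int)) : Prop := out = build_paths_alt data
instance (data : List (Int × Int × Int × Int × String)) (out : List (Int × Int × List Int)) : Decidable (Spec_build_paths data out) := by unfold Spec_build_paths; infer_instance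

-- ===== CLAIM (what is proved, stated in full; the proofs are below) =====
def Claim_equal_build_paths : Prop := ∀ (data : List (Int × Int × Int × Int × String)), Dom_build_paths data → Pre_build_paths data → Spec_build_paths data (build_paths data)

-- ===== LEMMAS AND PROOFS =====

-- Proof-only helpers: `finishA` is A's epilogue, `segs` the tail of A's state machine,
-- `gcIdx`/`mkSegs` B's anchors-then-ranges decomposition.

def finishA (st : Int × List Int × List (Int × Int × List Int)) : List (Int × Int × List Int) :=
  st.2.2 ++ [(st.1, 0, st.2.1)]

def segs (i : Int) (xs : List String) (start : Int) (w : List Int) : List (Int × Int × List Int) :=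
  match xs with
  | [] => [(start, 0, w)]
  | x :: xs' =>
    if PySem.Str.startswith x "GC" then (start, i, w) :: segs (i + 1) xs' i []
    else segs (i + 1) xs' start (w ++ [i])

def gcIdx (i : Int) (xs : List String) : List Int :=
  match xs with
  | [] => []
  | x :: xs' => if PySem.Str.startswith x "GC" then i :: gcIdx (i + 1) xs' else gcIdx (i + 1) xs'

def mkSegs (a : Int) (rest : List Int) (n : Int) : List (Int × Int × List Int) :=
  match rest with
  | [] => [(a, 0, PySem.List.pyRange (a + 1) n 1)]
  | b :: rest' => (a, b, PySem.List.pyRange (a + 1) b 1) :: mkSegs b rest' n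

-- A's loop over enumerate(ys, i) for i ≥ 1 (the index-0 branch never fires) computes
-- `segs` with the results list as an accumulator.
lemma A_loop (ys : List String) : ∀ (i start : Int) (w : List Int)
    (r : List (Int × Int × List Int)), 1 ≤ i →
    finishA ((PySem.List.enumerate ys i).foldl stepA (start, w, r)) = r ++ segs i ys start w := by
  induction ys with
  | nil => intro i start w r hi; simp [finishA, segs]
  | cons x xs ih =>
    intro i start w r hi
    rw [PySem.List.enumerate_cons, List.foldl_cons]
    by_cases hgc : PySem.Str.startswith x "GC"
    · have hstep : stepA (start, w, r) (i, x) = (i, [], r ++ [(start, i, w)]) := by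
        simp only [stepA]; rw [if_neg (show ¬ i = 0 by omega), if_pos hgc]
      have hseg : segs i (x :: xs) start w = (start, i, w) :: segs (i + 1) xs i [] := by
        simp only [segs]; rw [if_pos hgc]
      rw [hstep, ih (i + 1) i [] (r ++ [(start, i, w)]) (by omega), hseg, List.append_assoc]
      rfl
    · have hstep : stepA (start, w, r) (i, x) = (start, w ++ [i], r) := by
        simp only [stepA]; rw [if_neg (show ¬ i = 0 by omega), if_neg hgc]
      have hseg : segs i (x :: xs) start w = segs (i + 1) xs start (w ++ [i]) := by
        simp only [segs]; rw [if_neg hgc]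
      rw [hstep, ih (i + 1) start (w ++ [i]) r (by omega), hseg]

-- The state machine's accumulated waypoints are exactly the integer range between anchors.
lemma segs_eq (xs : List String) : ∀ (i start : Int), start < i →
    segs i xs start (PySem.List.pyRange (start + 1) i 1) =
      mkSegs start (gcIdx i xs) (i + xs.length) := by
  induction xs with
  | nil => intro i start h; simp [segs, gcIdx, mkSegs]
  | cons x xs ih =>
    intro i start h
    have hlen : i + 1 + (xs.length : Int) = i + ((x :: xs).length : Int) := by
      push_cast [List.length_cons]; ring
    by_cases hgc : PySem.Str.startswith x "GC"
    · have hs : segs i (x :: xs) start (PySem.List.pyRange (start + 1) i 1) =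
          (start, i, PySem.List.pyRange (start + 1) i 1) :: segs (i + 1) xs i [] := by
        simp only [segs]; rw [if_pos hgc]
      have hg : gcIdx i (x :: xs) = i :: gcIdx (i + 1) xs := by
        simp only [gcIdx]; rw [if_pos hgc]
      have h0 : ([] : List Int) = PySem.List.pyRange (i + 1) (i + 1) 1 :=
        (PySem.List.pyRange_one_eq_nil (le_refl _)).symm
      rw [hs, hg, h0, ih (i + 1) i (by omega), hlen]
      simp [mkSegs]
    · have hs : segs i (x :: xs) start (PySem.List.pyRange (start + 1) i 1) =
          segs (i + 1) xs start (PySem.List.pyRange (start + 1) i 1 ++ [i]) := by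
        simp only [segs]; rw [if_neg hgc]
      have hg : gcIdx i (x :: xs) = gcIdx (i + 1) xs := by
        simp only [gcIdx]; rw [if_neg hgc]
      have hr : PySem.List.pyRange (start + 1) i 1 ++ [i] =
          PySem.List.pyRange (start + 1) (i + 1) 1 :=
        (PySem.List.pyRange_one_succ_right (by omega)).symm
      rw [hs, hg, hr, ih (i + 1) start (by omega), hlen]

-- B's filtered range of indices is gcIdx over the corresponding suffix.
lemma filt (ys : List String) : ∀ (names : List String) (a : Nat), names.drop a = ys →
    (PySem.List.pyRange (a : Int) (names.length : Int) 1).filter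
      (fun i => PySem.Str.startswith (names.getD i.toNat "") "GC") =
      gcIdx (a : Int) ys := by
  induction ys with
  | nil =>
    intro names a hd
    have hlen : names.length ≤ a := by
      by_contra hlt
      have := List.drop_eq_nil_iff.mp hd
      omega
    rw [PySem.List.pyRange_one_eq_nil (by exact_mod_cast hlen)]
    simp [gcIdx]
  | cons y ys' ih =>
    intro names a hd
    have hlt : a < names.length := by
      by_contra hge
      rw [List.drop_eq_nil_of_le (by omega)] at hd
      simp at hd
    have hsome : names[a]? = some y := by
      have h := List.getElem?_drop (xs := names) (i := a) (j := 0)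
      rw [hd] at h
      first | simpa using h | simpa using h.symm
    have hy : names.getD a "" = y := by
      simp [List.getD_eq_getElem?_getD, hsome]
    rw [PySem.List.pyRange_one_cons (by exact_mod_cast hlt)]
    rw [List.filter_cons]
    have hdrop : names.drop (a + 1) = ys' := by
      have h1 : (names.drop a).drop 1 = ys' := by rw [hd]; rfl
      simpa [List.drop_drop, Nat.add_comm] using h1
    have hcast : ((a : Int) + 1) = ((a + 1 : Nat) : Int) := by push_cast; ring
    rw [hcast, ih names (a + 1) hdrop]
    simp only [Int.toNat_natCast, hy, gcIdx]
    by_cases hgc : PySem.Str.startswith y "GC"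
    · rw [if_pos hgc, if_pos hgc, ← hcast]
    · rw [if_neg hgc, ← hcast]
      rw [if_neg hgc]

-- B's zip/map-plus-last formulation of the segments equals mkSegs.
lemma zipmk (rest : List Int) : ∀ (a n : Int),
    ((a :: rest).zip rest).map (fun ab => (ab.1, ab.2, PySem.List.pyRange (ab.1 + 1) ab.2 1)) ++
      [((a :: rest).getLastD 0, 0, PySem.List.pyRange ((a :: rest).getLastD 0 + 1) n 1)] =
      mkSegs a rest n := by
  induction rest with
  | nil => intro a n; simp [mkSegs]
  | cons b rest' ih =>
    intro a n
    have hl : (a :: b :: rest').getLastD 0 = (b :: rest').getLastD 0 := by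
      simp
    rw [List.zip_cons_cons, List.map_cons, List.cons_append, hl, mkSegs]
    rw [← ih b n]

-- ===== VERDICT (by name: the statement is the Claim_ definition above) =====
theorem build_paths_spec : Claim_equal_build_paths := by
  intro data _ hpre
  unfold Spec_build_paths
  match data with
  | [] => exact absurd rfl hpre
  | d :: ds =>
    have f : (Int × Int × Int × Int × String) → String := fun t => t.2.2.2.2
    -- A's value: peel the index-0 step, run A_loop, then segs_eq
    have hA : build_paths (d :: ds) =
        mkSegs 0 (gcIdx 1 (ds.map (fun t => t.2.2.2.2))) (1 + ((ds.map (fun t => t.2.2.2.2)).length : Int)) := by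
      show finishA ((PySem.List.enumerate ((d :: ds).map (fun t => t.2.2.2.2)) 0).foldl stepA (0, [], [])) = _
      rw [List.map_cons, PySem.List.enumerate_cons, List.foldl_cons]
      have h0 : stepA ((0 : Int), ([] : List Int), ([] : List (Int × Int × List Int))) (0, d.2.2.2.2) = (0, [], []) := by
        simp [stepA]
      rw [h0, show (0 : Int) + 1 = 1 from rfl,
        A_loop (ds.map (fun t => t.2.2.2.2)) 1 0 [] [] (le_refl 1)]
      have hnil : ([] : List Int) = PySem.List.pyRange (0 + 1) 1 1 :=
        (PySem.List.pyRange_one_eq_nil (by omega)).symm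
      rw [List.nil_append, hnil, segs_eq (ds.map (fun t => t.2.2.2.2)) 1 0 (by omega)]
    -- B's value: filt then zipmk
    have hfilt : (PySem.List.pyRange 1 ((((d :: ds).map (fun t => t.2.2.2.2)).length : Int)) 1).filter
        (fun i => PySem.Str.startswith (((d :: ds).map (fun t => t.2.2.2.2)).getD i.toNat "") "GC") =
        gcIdx 1 (ds.map (fun t => t.2.2.2.2)) := by
      have h := filt (ds.map (fun t => t.2.2.2.2)) ((d :: ds).map (fun t => t.2.2.2.2)) 1 (by simp)
      simpa using h
    have hB : build_paths_alt (d :: ds) =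
        mkSegs 0 (gcIdx 1 (ds.map (fun t => t.2.2.2.2))) ((((d :: ds).map (fun t => t.2.2.2.2)).length : Int)) := by
      show _ ++ _ = _
      rw [hfilt, List.tail_cons, zipmk]
    rw [hA, hB]
    congr 1
    simp
    omega
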